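-- pv_equiv track=rewrite | github.com/peripaterikm/OOS | src/oos/live_quality_smoke.py | _top_user_pain_like_count
-- ===== SOURCE A (Python) =====
-- from typing import Any, Iterable, Mapping
--
-- _USER_PAIN_MARKERS = (
--     "describe alternatives",
--     "describe the solution you'd like",
--     "would need to maintain",
--     "separate spreadsheet",
--     "balance sheet",
--     "invoice",
--     "invoice payment",
--     "following up on my invoice",
--     "manual spreadsheet",
--     "current workaround",
--     "i would like",
--     "i want to",
--     "i built this because",
--     "tired of",
--     "cash flow",
--     "bookkeeping",
--     "accounting software",
-- )
--
-- def _top_user_pain_like_count(top_signals: list[Any]) -> int: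
--     count = 0
--     markers = [marker.lower() for marker in _USER_PAIN_MARKERS]
--     for signal in top_signals:
--         if not isinstance(signal, dict):
--             continue
--         text = " ".join(
--             str(signal.get(key, ""))
--             for key in ("pain_summary", "current_workaround", "buying_intent_hint", "source_type")
--         ).lower()
--         if any(marker in text for marker in markers):
--             count += 1
--     return count
-- ===== SOURCE B (Python) =====
-- _USER_PAIN_MARKERS = (
--     "describe alternatives",
--     "describe the solution you'd like",
--     "would need to maintain",
--     "separate spreadsheet",
--     "balance sheet",
--     "invoice",
--     "invoice payment",
--     "following up on my invoice",
--     "manual spreadsheet",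
--     "current workaround",
--     "i would like",
--     "i want to",
--     "i built this because",
--     "tired of",
--     "cash flow",
--     "bookkeeping",
--     "accounting software",
-- )
--
-- _SIGNAL_KEYS = ("pain_summary", "current_workaround", "buying_intent_hint", "source_type")
--
--
-- def _top_user_pain_like_count(top_signals):
--     # Collect each dict sig's searchable text once, keyed by its position.
--     texts = []
--     for i, sig in enumerate(top_signals):
--         if isinstance(sig, dict):
--             texts.append((i, " ".join(str(sig.get(k, "")) for k in _SIGNAL_KEYS).lower()))
--     # Marker-major sweep: gather the positions hit by each marker into one set.
--     hits = set()
--     for marker in _USER_PAIN_MARKERS: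
--         m = marker.lower()
--         hits.update(i for i, text in texts if m in text)
--     return len(hits)
-- ===== Notes on version B (the rewrite author's own statement) =====
-- stated objective: alternative
-- what changed: B inverts the loop nest: instead of A's per-signal counter asking 'does any marker occur in this text', B precomputes each signal's text once, then sweeps marker-by-marker collecting the positions each marker hits into one set and returns its size.
import Mathlib
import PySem

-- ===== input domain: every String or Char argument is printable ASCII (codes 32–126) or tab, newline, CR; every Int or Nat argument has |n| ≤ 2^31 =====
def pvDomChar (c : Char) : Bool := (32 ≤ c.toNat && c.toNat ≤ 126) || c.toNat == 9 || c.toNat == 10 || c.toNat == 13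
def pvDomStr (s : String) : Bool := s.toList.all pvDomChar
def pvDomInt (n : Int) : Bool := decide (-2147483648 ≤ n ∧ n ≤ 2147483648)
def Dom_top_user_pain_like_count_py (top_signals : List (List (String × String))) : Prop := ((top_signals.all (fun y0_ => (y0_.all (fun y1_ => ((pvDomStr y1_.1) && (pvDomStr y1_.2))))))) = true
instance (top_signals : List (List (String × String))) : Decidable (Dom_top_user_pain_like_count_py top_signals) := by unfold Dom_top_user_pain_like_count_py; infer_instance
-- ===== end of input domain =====

-- B inverts A's loop nest: A walks the signals and asks 'any marker in this text?';
-- B walks the markers and collects the positions of the signals each marker hits into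
-- one set, returning its size (objective: alternative, same cost class).
-- Under the type convention every signal is a dict, so A's isinstance guard is always true
-- and B's isinstance filter keeps every signal.

def pvPainMarkers : List String :=
  ["describe alternatives", "describe the solution you'd like", "would need to maintain",
   "separate spreadsheet", "balance sheet", "invoice", "invoice payment",
   "following up on my invoice", "manual spreadsheet", "current workaround",
   "i would like", "i want to", "i built this because", "tired of", "cash flow",
   "bookkeeping", "accounting software"]

def pvSignalKeys : List String :=
  ["pain_summary", "current_workaround", "buying_intent_hint", "source_type"]

-- the joined, lowered searchable text of one signal (shared shape of both Pythons)
def pvSignalText (signal : List (String × String)) : String :=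
  PySem.Str.lower
    (PySem.Str.join " " (pvSignalKeys.map (fun key => PySem.Dict.getD (PySem.Dict.mk signal) key "")))

-- ===== PORT A =====
def top_user_pain_like_count_py (top_signals : List (List (String × String))) : Int :=
  let markers := pvPainMarkers.map (fun marker => PySem.Str.lower marker)
  top_signals.foldl
    (fun count signal =>
      let text := pvSignalText signal
      if markers.any (fun marker => PySem.Str.isIn marker text) then count + 1 else count)
    0

-- ===== PORT B =====
def top_user_pain_like_count_py_alt (top_signals : List (List (String × String))) : Int :=
  -- texts = [(i, joined lowered text)] for the (always-dict) signals
  let texts : List (Int × String) :=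
    (PySem.List.enumerate top_signals).map (fun p => (p.1, pvSignalText p.2))
  -- hits = set(); for marker: hits.update(i for i, text in texts if m in text)
  let hits : PySem.Set Int :=
    pvPainMarkers.foldl
      (fun hits marker =>
        let m := PySem.Str.lower marker
        PySem.Set.update hits ((texts.filter (fun q => PySem.Str.isIn m q.2)).map (fun q => q.1)))
      PySem.Set.empty
  PySem.Set.len hits

-- ===== PRECONDITION & SPEC =====
def Spec_top_user_pain_like_count_py (top_signals : List (List (String × String))) (out : Int) : Prop := out = top_user_pain_like_count_py_alt top_signals
instance (top_signals : List (List (String × String))) (out : Int) : Decidable (Spec_top_user_pain_like_count_py top_signals out) := by unfold Spec_top_user_pain_like_count_py; infer_instance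

-- ===== CLAIM (what is proved, stated in full; the proofs are below) =====
def Claim_equal_top_user_pain_like_count_py : Prop := ∀ (top_signals : List (List (String × String))), Dom_top_user_pain_like_count_py top_signals → Spec_top_user_pain_like_count_py top_signals (top_user_pain_like_count_py top_signals)

-- ===== LEMMAS AND PROOFS =====
-- Everything is proved for an ARBITRARY marker list ms and instantiated with pvPainMarkers
-- at the end, so no proof step ever has to evaluate the literal marker strings.

lemma pvHits_nodup (ms : List String) (texts : List (Int × String)) (s : PySem.Set Int)
    (hs : s.Nodup) :
    (ms.foldl
      (fun hits marker =>
        PySem.Set.update hits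
          ((texts.filter (fun q => PySem.Str.isIn (PySem.Str.lower marker) q.2)).map (fun q => q.1)))
      s).Nodup := by
  induction ms generalizing s with
  | nil => exact hs
  | cons m ms ih => exact ih _ (PySem.Set.nodup_update _ _ hs)

lemma pvHits_mem (ms : List String) (texts : List (Int × String)) (s : PySem.Set Int) (x : Int) :
    (x ∈ ms.foldl
      (fun hits marker =>
        PySem.Set.update hits
          ((texts.filter (fun q => PySem.Str.isIn (PySem.Str.lower marker) q.2)).map (fun q => q.1)))
      s) ↔
    x ∈ s ∨ ∃ q ∈ texts, q.1 = x ∧ (ms.map (fun marker => PySem.Str.lower marker)).any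
        (fun m => PySem.Str.isIn m q.2) = true := by
  induction ms generalizing s with
  | nil => simp
  | cons m ms ih =>
      simp only [List.foldl_cons, ih, PySem.Set.mem_update, List.mem_map, List.mem_filter,
        List.map_cons, List.any_cons, Bool.or_eq_true, List.any_eq_true]
      constructor
      · rintro ((hx | ⟨q, ⟨hq, hin⟩, rfl⟩) | ⟨q, hq, rfl, h⟩)
        · exact Or.inl hx
        · exact Or.inr ⟨q, hq, rfl, Or.inl hin⟩
        · exact Or.inr ⟨q, hq, rfl, Or.inr h⟩
      · rintro (hx | ⟨q, hq, rfl, (hin | h)⟩)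
        · exact Or.inl (Or.inl hx)
        · exact Or.inl (Or.inr ⟨q, ⟨hq, hin⟩, rfl⟩)
        · exact Or.inr ⟨q, hq, rfl, h⟩

-- does any lowered marker of ms occur in t?
def pvHit (ms : List String) (t : String) : Bool :=
  (ms.map (fun marker => PySem.Str.lower marker)).any (fun m => PySem.Str.isIn m t)

-- the reference list of hit indices, in index order
def pvRef (ms : List String) (texts : List (Int × String)) : List Int :=
  (texts.filter (fun q => pvHit ms q.2)).map (fun q => q.1)

lemma pvRef_nodup (ms : List String) (texts : List (Int × String))
    (h : texts.Pairwise (fun a b => a.1 < b.1)) : (pvRef ms texts).Nodup := by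
  have hpw : (pvRef ms texts).Pairwise (· < ·) :=
    List.Pairwise.map _ (fun a b hab => hab) ((List.Pairwise.filter _) h)
  exact hpw.imp ne_of_lt

lemma pvRef_length (ms : List String) (texts : List (Int × String)) :
    (pvRef ms texts).length = texts.countP (fun q => pvHit ms q.2) := by
  unfold pvRef
  rw [List.length_map]
  exact List.countP_eq_length_filter.symm

lemma pvCountP_enumerate {α : Type} (ts : List α) (s : Int) (p : α → Bool) :
    (PySem.List.enumerate ts s).countP (fun q => p q.2) = ts.countP p := by
  induction ts generalizing s with
  | nil => simp [PySem.List.enumerate_nil]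
  | cons t ts ih => simp [PySem.List.enumerate_cons, List.countP_cons, ih]

lemma pvFoldl_count (ms : List String) (ts : List (List (String × String))) (n : Int) :
    ts.foldl
      (fun count signal =>
        if (ms.map (fun marker => PySem.Str.lower marker)).any
            (fun marker => PySem.Str.isIn marker (pvSignalText signal))
          then count + 1 else count) n
      = n + (ts.countP (fun signal => pvHit ms (pvSignalText signal)) : Int) := by
  induction ts generalizing n with
  | nil => simp
  | cons s ts ih =>
      rw [List.foldl_cons, ih, List.countP_cons]
      simp only [pvHit]
      split_ifs with h
      · push_cast; ring
      · simp

-- the whole equivalence, for an arbitrary marker list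
lemma pvMain (ms : List String) (ts : List (List (String × String))) :
    ts.foldl
      (fun count signal =>
        if (ms.map (fun marker => PySem.Str.lower marker)).any
            (fun marker => PySem.Str.isIn marker (pvSignalText signal))
          then count + 1 else count) 0
    = PySem.Set.len
        (ms.foldl
          (fun hits marker =>
            PySem.Set.update hits
              ((((PySem.List.enumerate ts).map (fun p => (p.1, pvSignalText p.2))).filter
                  (fun q => PySem.Str.isIn (PySem.Str.lower marker) q.2)).map (fun q => q.1)))
          PySem.Set.empty) := by
  rw [pvFoldl_count, zero_add]
  set texts : List (Int × String) :=
    (PySem.List.enumerate ts).map (fun p => (p.1, pvSignalText p.2)) with htexts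
  set hits : PySem.Set Int :=
    ms.foldl
      (fun hits marker =>
        PySem.Set.update hits
          ((texts.filter (fun q => PySem.Str.isIn (PySem.Str.lower marker) q.2)).map (fun q => q.1)))
      PySem.Set.empty with hhits
  have hnodupHits : hits.Nodup :=
    pvHits_nodup ms texts PySem.Set.empty (by simp [PySem.Set.empty])
  have hnodupRef : (pvRef ms texts).Nodup := by
    apply pvRef_nodup
    rw [htexts]
    exact List.Pairwise.map _ (fun a b hab => hab) (PySem.List.pairwise_lt_enumerate ts 0)
  have hmem : ∀ x : Int, x ∈ hits ↔ x ∈ pvRef ms texts := by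
    intro x
    rw [hhits, pvHits_mem]
    unfold pvRef pvHit
    simp only [PySem.Set.empty, List.not_mem_nil, false_or, List.mem_map, List.mem_filter]
    constructor
    · rintro ⟨q, hq, rfl, h⟩; exact ⟨q, ⟨hq, h⟩, rfl⟩
    · rintro ⟨q, ⟨hq, h⟩, rfl⟩; exact ⟨q, hq, rfl, h⟩
  have hperm : hits.Perm (pvRef ms texts) :=
    (List.perm_ext_iff_of_nodup hnodupHits hnodupRef).2 hmem
  have hlen : PySem.Set.len hits = ((pvRef ms texts).length : Int) := by
    simp [PySem.Set.len, hperm.length_eq]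
  rw [hlen, pvRef_length]
  congr 1
  rw [htexts, List.countP_map]
  exact (pvCountP_enumerate ts 0 (fun signal => pvHit ms (pvSignalText signal))).symm

-- ===== VERDICT (by name: the statement is the Claim_ definition above) =====
theorem top_user_pain_like_count_py_spec : Claim_equal_top_user_pain_like_count_py := by
  intro ts _
  unfold Spec_top_user_pain_like_count_py top_user_pain_like_count_py top_user_pain_like_count_py_alt
  exact pvMain pvPainMarkers ts
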